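-- pv_equiv track=rewrite | github.com/sina-m-mollazadeh/Super-Sudoku-CSP | main.py | generate_solutions
-- ===== SOURCE A (Python) =====
-- def generate_solutions(n, k, current_solution=[]):
--     if k == 0:
--         # Check if the current solution satisfies the equation sum
--         if sum(current_solution) == n:
--             yield tuple(current_solution)
--         return
--
--     for i in range(11):  # Values from 0 to 10 (inclusive)
--         # Try the current value
--         current_solution.append(i)
--
--         # Recursively generate solutions for the remaining variables
--         yield from generate_solutions(n, k - 1, current_solution)
--
--         # Backtrack: remove the last value to try the next one
--         current_solution.pop()
-- ===== SOURCE B (Python) =====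
-- def generate_solutions(n, k, current_solution=[]):
--     # Iterative DFS over an explicit stack, with sum-bound pruning: a frame (prefix, rem, j)
--     # only spawns values i with max(0, rem - 10*(j-1)) <= i <= min(10, rem), i.e. branches
--     # that can still reach the target sum.  Values are pushed in descending order so that
--     # popping yields the same ascending (lexicographic) order as the recursive enumeration.
--     stack = [(tuple(current_solution), n - sum(current_solution), k)]
--     while stack:
--         prefix, rem, j = stack.pop()
--         if j == 0:
--             if rem == 0:
--                 yield prefix
--             continue
--         lo = max(0, rem - 10 * (j - 1))
--         hi = min(10, rem)
--         for i in range(hi, lo - 1, -1):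
--             stack.append((prefix + (i,), rem - i, j - 1))
-- ===== Notes on version B (the rewrite author's own statement) =====
-- stated objective: faster
-- what changed: A recursively enumerates all 11^k value assignments and checks the sum only at the leaves; B runs an explicit-stack DFS that prunes at every level to the feasible value window [max(0, rem-10*(k-1)), min(10, rem)], so it only walks branches that can still reach the target sum and needs no deep Python recursion; intended as faster (a timing run measured B 67.5x at the largest size both finished, with A timing out beyond that, though below the check's >=100ms confirmation threshold).
import Mathlib
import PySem

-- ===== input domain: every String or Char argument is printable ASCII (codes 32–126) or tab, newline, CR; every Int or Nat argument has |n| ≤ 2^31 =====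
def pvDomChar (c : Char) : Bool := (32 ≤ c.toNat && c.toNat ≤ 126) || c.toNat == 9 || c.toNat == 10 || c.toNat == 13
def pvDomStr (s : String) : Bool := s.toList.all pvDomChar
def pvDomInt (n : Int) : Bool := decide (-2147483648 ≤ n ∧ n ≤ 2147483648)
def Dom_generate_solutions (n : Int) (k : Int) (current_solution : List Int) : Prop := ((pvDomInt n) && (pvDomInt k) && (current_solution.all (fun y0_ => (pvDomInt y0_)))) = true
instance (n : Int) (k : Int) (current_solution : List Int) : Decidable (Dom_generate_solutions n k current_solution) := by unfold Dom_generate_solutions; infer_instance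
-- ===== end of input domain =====

-- B replaces A's recursive blind enumeration of all 11^k assignments with an explicit-stack
-- DFS that prunes every branch whose remaining sum cannot reach the target (intended as
-- faster; a timing run measured B 67.5x at the largest size both finished, with A
-- timing out beyond that, but below its >=100ms confirmation threshold).  Both ports model the SEQUENCE the Python generator yields
-- (A mutates current_solution while iterating but restores it before finishing; only the
-- yielded values are modeled).

-- ===== PORT A =====
-- A recurses with k-1 until k == 0; ported with fuel k.toNat (for k < 0 the Python recursion
-- never reaches its base case: RecursionError, excluded by Pre_).
def pvGenA (n : Int) : Nat → List Int → List (List Int)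
  | 0, cur => if cur.sum = n then [cur] else []
  | k + 1, cur =>
      -- for i in range(11): current_solution.append(i); yield from …; current_solution.pop()
      (PySem.List.pyRange 0 11).foldl (fun acc i => acc ++ pvGenA n k (cur ++ [i])) []

def generate_solutions (n : Int) (k : Int) (current_solution : List Int) : List (List Int) :=
  pvGenA n k.toNat current_solution

-- ===== PORT B =====
-- The Python stack (top = last element) is modeled head-first: stack.append is cons, and the
-- descending push loop 'for i in range(hi, lo - 1, -1): stack.append(…)' is the foldl below.
def pvPush (pfx : List Int) (rem : Int) (j : Int) (st : List (List Int × Int × Int)) :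
    List (List Int × Int × Int) :=
  (PySem.List.pyRange (min 10 rem) (max 0 (rem - 10 * (j - 1)) - 1) (-1)).foldl
    (fun s i => (pfx ++ [i], rem - i, j - 1) :: s) st

-- weight of a stack (used only for termination of the while loop)
def pvW (st : List (List Int × Int × Int)) : Nat := (st.map (fun e => 12 ^ e.2.2.toNat)).sum

-- the push loop, written as the list it produces (cited by theport's decreasing_by and proofs)
theorem pvPush_eq (pfx : List Int) (rem : Int) (j : Int) (st : List (List Int × Int × Int)) :
    pvPush pfx rem j st
      = (PySem.List.pyRange (max 0 (rem - 10 * (j - 1))) (min 10 rem + 1)).map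
          (fun i => (pfx ++ [i], rem - i, j - 1)) ++ st := by
  unfold pvPush
  rw [PySem.List.pyRange_neg_one_eq_reverse, List.foldl_reverse]
  have harg : max 0 (rem - 10 * (j - 1)) - 1 + 1 = max 0 (rem - 10 * (j - 1)) := by omega
  rw [harg]
  generalize PySem.List.pyRange (max 0 (rem - 10 * (j - 1))) (min 10 rem + 1) = l
  induction l with
  | nil => rfl
  | cons a t ih => simp [ih]

theorem pvW_push_lt (pfx : List Int) (rem : Int) (j : Int) (st : List (List Int × Int × Int))
    (hj : j ≠ 0) : pvW (pvPush pfx rem j st) < 12 ^ j.toNat + pvW st := by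
  rw [pvPush_eq]
  unfold pvW
  rw [List.map_append, List.sum_append, List.map_map]
  simp only [Function.comp_def]
  rw [PySem.List.sum_map_const_nat]
  rcases lt_or_gt_of_ne hj with hneg | hpos
  · -- j < 0: the pushed range is empty and 12 ^ j.toNat = 1
    rw [PySem.List.pyRange_one_eq_nil (by omega), Int.toNat_of_nonpos (by omega)]
    simp
  · -- j > 0: at most 11 values are pushed, each of weight 12 ^ (j-1).toNat
    have hlen : (PySem.List.pyRange (max 0 (rem - 10 * (j - 1))) (min 10 rem + 1)).length ≤ 11 := by
      rw [PySem.List.pyRange_one]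
      simp
      omega
    have hpow : j.toNat = (j - 1).toNat + 1 := by omega
    rw [hpow, pow_succ]
    have hc : 0 < 12 ^ (j - 1).toNat := Nat.pow_pos (by norm_num)
    calc (PySem.List.pyRange (max 0 (rem - 10 * (j - 1))) (min 10 rem + 1)).length
          * 12 ^ (j - 1).toNat + pvW st
        ≤ 11 * 12 ^ (j - 1).toNat + pvW st := by
          exact Nat.add_le_add_right (Nat.mul_le_mul_right _ hlen) _
      _ < 12 ^ (j - 1).toNat * 12 + pvW st := by
          rw [mul_comm (12 ^ (j - 1).toNat) 12]
          exact Nat.add_lt_add_right ((Nat.mul_lt_mul_right hc).mpr (by norm_num)) _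

-- while stack: prefix, rem, j = stack.pop(); …
def pvStackRun : List (List Int × Int × Int) → List (List Int)
  | [] => []
  | (pfx, rem, j) :: st =>
      if j = 0 then (if rem = 0 then [pfx] else []) ++ pvStackRun st
      else pvStackRun (pvPush pfx rem j st)
  termination_by st => pvW st
  decreasing_by
  · simp only [pvW, List.map_cons, List.sum_cons]
    have : 0 < 12 ^ j.toNat := Nat.pow_pos (by norm_num)
    omega
  · simp only [pvW, List.map_cons, List.sum_cons]
    exact pvW_push_lt pfx rem j st (by assumption)

def generate_solutions_alt (n : Int) (k : Int) (current_solution : List Int) : List (List Int) :=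
  pvStackRun [(current_solution, n - current_solution.sum, k)]

-- ===== PRECONDITION & SPEC =====
-- Pre_ excludes exactly the inputs on which consuming A's generator raises RecursionError:
-- k < 0 (the recursion never reaches its base case) and k beyond CPython's recursion limit
-- (the first descent already needs k nested generator frames; 900 is safely below the
-- default limit of 1000).
def Pre_generate_solutions (n : Int) (k : Int) (current_solution : List Int) : Prop :=
  0 ≤ k ∧ k ≤ 900
instance (n : Int) (k : Int) (current_solution : List Int) : Decidable (Pre_generate_solutions n k current_solution) := by unfold Pre_generate_solutions; infer_instance

def pvWitness_generate_solutions : Int × Int × List Int := (2, 2, [])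

def Spec_generate_solutions (n : Int) (k : Int) (current_solution : List Int) (out : List (List Int)) : Prop := out = generate_solutions_alt n k current_solution
instance (n : Int) (k : Int) (current_solution : List Int) (out : List (List Int)) : Decidable (Spec_generate_solutions n k current_solution out) := by unfold Spec_generate_solutions; infer_instance

-- ===== CLAIM (what is proved, stated in full; the proofs are below) =====
def Claim_equal_generate_solutions : Prop := ∀ (n : Int) (k : Int) (current_solution : List Int), Dom_generate_solutions n k current_solution → Pre_generate_solutions n k current_solution → Spec_generate_solutions n k current_solution (generate_solutions n k current_solution)

-- ===== LEMMAS AND PROOFS =====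

-- Recursive description of the pruned DFS: what the stack machine computes per frame.
def pvGoB : List Int → Int → Nat → List (List Int)
  | pfx, rem, 0 => if rem = 0 then [pfx] else []
  | pfx, rem, k + 1 =>
      (PySem.List.pyRange (max 0 (rem - 10 * (k : Int))) (min 10 rem + 1)).foldl
        (fun acc i => acc ++ pvGoB (pfx ++ [i]) (rem - i) k) []

-- value of one stack frame (j < 0 frames spawn nothing and yield nothing)
def pvFrame (e : List Int × Int × Int) : List (List Int) :=
  if e.2.2 < 0 then [] else pvGoB e.1 e.2.1 e.2.2.toNat

theorem pvRange_nil (a b : Int) (h : b ≤ a) : PySem.List.pyRange a b = [] :=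
  PySem.List.pyRange_one_eq_nil h

-- Pruning is sound: outside 0 ≤ rem ≤ 10*k no tuple can be produced.
theorem pvGoB_empty (k : Nat) (pfx : List Int) (rem : Int)
    (h : rem < 0 ∨ 10 * (k : Int) < rem) : pvGoB pfx rem k = [] := by
  cases k with
  | zero =>
      unfold pvGoB
      rw [if_neg]
      omega
  | succ k =>
      unfold pvGoB
      rw [pvRange_nil _ _ (by push_cast at h ⊢; omega)]
      rfl

-- A frame with j ≠ 0 equals the flattened values of the frames it pushes.
theorem pvFrame_step (pfx : List Int) (rem : Int) (j : Int) (hj : j ≠ 0) :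
    pvFrame (pfx, rem, j)
      = (PySem.List.pyRange (max 0 (rem - 10 * (j - 1))) (min 10 rem + 1)).flatMap
          (fun i => pvFrame (pfx ++ [i], rem - i, j - 1)) := by
  dsimp only [pvFrame]
  rcases lt_or_gt_of_ne hj with hneg | hpos
  · -- j < 0: both sides are empty (the pruned range is empty)
    rw [pvRange_nil _ _ (by omega), if_pos hneg]
    rfl
  · -- j > 0
    have hjn : j.toNat = (j - 1).toNat + 1 := by omega
    have hcast : ((j - 1).toNat : Int) = j - 1 := by omega
    rw [if_neg (by omega), hjn]
    conv_lhs => rw [pvGoB]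
    rw [PySem.List.foldl_append_eq_flatMap, List.nil_append, hcast]
    simp only [if_neg (show ¬ j - 1 < 0 by omega)]

-- The stack machine computes the concatenation of its frames' values.
theorem pvStackRun_eq (st : List (List Int × Int × Int)) :
    pvStackRun st = st.flatMap pvFrame := by
  fun_induction pvStackRun with
  | case1 => rfl
  | case2 pfx rem st ih =>
      rw [List.flatMap_cons, ih]
      rfl
  | case3 pfx rem j st hj ih =>
      rw [ih, pvPush_eq, List.flatMap_append, List.flatMap_cons, List.flatMap_map,
          pvFrame_step pfx rem j hj]

-- The core equivalence of the two enumerations, by induction on the fuel.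
theorem pvGenA_eq_pvGoB (k : Nat) (n : Int) (cur : List Int) :
    pvGenA n k cur = pvGoB cur (n - cur.sum) k := by
  induction k generalizing cur with
  | zero =>
      unfold pvGenA pvGoB
      by_cases h : cur.sum = n
      · rw [if_pos h, if_pos (by omega)]
      · rw [if_neg h, if_neg (by omega)]
  | succ k ih =>
      unfold pvGenA pvGoB
      rw [PySem.List.foldl_append_eq_flatMap, PySem.List.foldl_append_eq_flatMap]
      simp only [List.nil_append]
      have hg : (fun i => pvGenA n k (cur ++ [i]))
          = fun i => pvGoB (cur ++ [i]) (n - cur.sum - i) k := by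
        funext i
        rw [ih]
        congr 1
        simp [List.sum_append]
        ring
      rw [hg]
      set rem := n - cur.sum with hrem
      set g : Int → List (List Int) := fun i => pvGoB (cur ++ [i]) (rem - i) k with hgdef
      by_cases hfeas : 0 ≤ rem ∧ rem ≤ 10 * ((k : Int) + 1)
      · -- split [0, 11) into [0, lo) ++ [lo, hi+1) ++ [hi+1, 11); the side pieces yield nothing
        have hlo1 : (0 : Int) ≤ max 0 (rem - 10 * (k : Int)) := by omega
        have hlo2 : max 0 (rem - 10 * (k : Int)) ≤ min 10 rem + 1 := by omega
        have hhi : min 10 rem + 1 ≤ 11 := by omega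
        rw [PySem.List.pyRange_one_append 0 (max 0 (rem - 10 * (k : Int))) 11 hlo1 (by omega),
            PySem.List.pyRange_one_append (max 0 (rem - 10 * (k : Int))) (min 10 rem + 1) 11 hlo2 hhi]
        rw [List.flatMap_append, List.flatMap_append]
        have h1 : List.flatMap g (PySem.List.pyRange 0 (max 0 (rem - 10 * (k : Int)))) = [] := by
          rw [List.flatMap_eq_nil_iff]
          intro i hi
          rw [PySem.List.mem_pyRange_one] at hi
          exact pvGoB_empty k _ _ (by omega)
        have h2 : List.flatMap g (PySem.List.pyRange (min 10 rem + 1) 11) = [] := by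
          rw [List.flatMap_eq_nil_iff]
          intro i hi
          rw [PySem.List.mem_pyRange_one] at hi
          exact pvGoB_empty k _ _ (by omega)
        rw [h1, h2, List.nil_append, List.append_nil]
      · -- infeasible remaining sum: both sides are empty
        have hR : PySem.List.pyRange (max 0 (rem - 10 * (k : Int))) (min 10 rem + 1) = [] := by
          apply pvRange_nil
          omega
        rw [hR]
        simp only [List.flatMap_nil]
        rw [List.flatMap_eq_nil_iff]
        intro i hi
        rw [PySem.List.mem_pyRange_one] at hi
        exact pvGoB_empty k _ _ (by omega)

-- ===== VERDICT (by name: the statement is the Claim_ definition above) =====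
theorem generate_solutions_spec : Claim_equal_generate_solutions := by
  intro n k cur _ hpre
  obtain ⟨hk, -⟩ := hpre
  unfold Spec_generate_solutions generate_solutions generate_solutions_alt
  rw [pvStackRun_eq]
  simp only [List.flatMap_cons, List.flatMap_nil, List.append_nil]
  dsimp only [pvFrame]
  rw [if_neg (by omega)]
  exact pvGenA_eq_pvGoB k.toNat n cur
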